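-- pv_equiv track=rewrite | github.com/nasa/GeneLab_Data_Processing | RNAseq/Workflow_Documentation/NF_RCP/workflow_code/bin/vv_dge_deseq2.py | r_style_make_names
-- ===== SOURCE A (Python) =====
-- import string
--
-- def r_style_make_names(s: str) -> str:
--     """Recreates R's make.names function for individual strings.
--     This function is often used to create syntactically valid names in R which are then saved in R outputs.
--     Source: https://www.rdocumentation.org/packages/base/versions/3.6.2/topics/make.names
--
--     Args:
--         s (str): A string to convert
--
--     Returns:
--         str: A string converted in the same way as R's make.names function
--     """
--     EXTRA_WHITELIST_CHARACTERS = "_ΩπϴλθijkuΑΒΓΔΕΖΗΘΙΚΛΜΝΞΟΠΡΣΤΥΦΧΨΩαβγδεζηθικλμνξοπρστυφχψω_µ" # Note: there are two "μμ" like characters one is greek letter mu, the other is the micro sign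
--     VALID_CHARACTERS = string.ascii_letters + string.digits + "." + EXTRA_WHITELIST_CHARACTERS
--     REPLACEMENT_CHAR = "."
--     new_string_chars = list()
--     for char in s:
--         if char in VALID_CHARACTERS:
--             new_string_chars.append(char)
--         else:
--             new_string_chars.append(REPLACEMENT_CHAR)
--     return "".join(new_string_chars)
-- ===== SOURCE B (Python) =====
-- import string
--
-- def r_style_make_names(s: str) -> str:
--     """Run-based rewrite: scan s as maximal runs of valid / invalid characters,
--     keep valid runs verbatim and emit '.'*len for invalid runs."""
--     EXTRA_WHITELIST_CHARACTERS = "_ΩπϴλθijkuΑΒΓΔΕΖΗΘΙΚΛΜΝΞΟΠΡΣΤΥΦΧΨΩαβγδεζηθικλμνξοπρστυφχψω_µ"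
--     valid = set(string.ascii_letters + string.digits + "." + EXTRA_WHITELIST_CHARACTERS)
--     parts = []
--     i, n = 0, len(s)
--     while i < n:
--         ok = s[i] in valid
--         j = i + 1
--         while j < n and (s[j] in valid) == ok:
--             j += 1
--         parts.append(s[i:j] if ok else "." * (j - i))
--         i = j
--     return "".join(parts)
-- ===== Notes on version B (the rewrite author's own statement) =====
-- stated objective: alternative
-- what changed: Replaced the per-character loop with append and if/else by a two-level run scanner: an index loop finds each maximal run of same-validity characters and emits the run verbatim (valid) or a replacement-character fill of its length (invalid), joined at the end.
import Mathlib
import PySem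

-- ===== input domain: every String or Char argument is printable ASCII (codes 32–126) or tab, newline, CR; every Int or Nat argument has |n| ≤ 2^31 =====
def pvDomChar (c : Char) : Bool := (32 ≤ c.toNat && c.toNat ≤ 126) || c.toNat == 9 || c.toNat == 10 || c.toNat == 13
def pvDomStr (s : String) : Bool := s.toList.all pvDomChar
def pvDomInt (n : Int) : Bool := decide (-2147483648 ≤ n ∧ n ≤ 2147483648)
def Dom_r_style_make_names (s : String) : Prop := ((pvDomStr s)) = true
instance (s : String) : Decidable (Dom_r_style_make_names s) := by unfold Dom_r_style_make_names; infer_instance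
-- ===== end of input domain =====

-- B replaces A's per-character loop-and-append with a run scanner: maximal runs of
-- same-validity characters, kept verbatim or replaced by a '.'-fill ('alternative' objective).

-- ===== PORT A =====
-- VALID_CHARACTERS = string.ascii_letters + string.digits + "." + EXTRA_WHITELIST_CHARACTERS
def pvValidCharacters : String := "abcdefghijklmnopqrstuvwxyzABCDEFGHIJKLMNOPQRSTUVWXYZ0123456789._ΩπϴλθijkuΑΒΓΔΕΖΗΘΙΚΛΜΝΞΟΠΡΣΤΥΦΧΨΩαβγδεζηθικλμνξοπρστυφχψω_µ"

-- per-character loop: append the char if whitelisted, else the replacement char "."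
def r_style_make_names (s : String) : String :=
  String.ofList (s.toList.foldl
    (fun acc char => acc ++ [if char ∈ pvValidCharacters.toList then char else '.']) [])

-- ===== PORT B =====
-- inner while loop: collect the rest of a run whose validity equals `ok`,
-- returning (run, remainder); mirrors Source B's advance of j past same-validity chars
def pvTakeRun (ok : Bool) : List Char → List Char × List Char
  | [] => ([], [])
  | c :: t =>
    if decide (c ∈ pvValidCharacters.toList) = ok then
      let p := pvTakeRun ok t
      (c :: p.1, p.2)
    else ([], c :: t)

theorem pvTakeRun_snd_length_le (ok : Bool) (l : List Char) :
    (pvTakeRun ok l).2.length ≤ l.length := by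
  induction l with
  | nil => simp [pvTakeRun]
  | cons c t ih =>
      simp only [pvTakeRun]
      split
      · simpa using Nat.le_succ_of_le ih
      · simp

-- outer while loop: emit each maximal run, verbatim if valid, '.'-filled otherwise
def pvRunScan : List Char → List Char
  | [] => []
  | c :: t =>
    let ok := decide (c ∈ pvValidCharacters.toList)
    let p := pvTakeRun ok t
    (if ok then c :: p.1 else List.replicate (c :: p.1).length '.') ++ pvRunScan p.2
  termination_by l => l.length
  decreasing_by
    simpa using Nat.lt_succ_of_le (pvTakeRun_snd_length_le _ t)

def r_style_make_names_alt (s : String) : String := String.ofList (pvRunScan s.toList)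

-- ===== PRECONDITION & SPEC =====
def Spec_r_style_make_names (s : String) (out : String) : Prop := out = r_style_make_names_alt s
instance (s : String) (out : String) : Decidable (Spec_r_style_make_names s out) := by unfold Spec_r_style_make_names; infer_instance

-- ===== CLAIM (what is proved, stated in full; the proofs are below) =====
def Claim_equal_r_style_make_names : Prop := ∀ (s : String), Dom_r_style_make_names s → Spec_r_style_make_names s (r_style_make_names s)

-- ===== LEMMAS AND PROOFS =====
def pvF (c : Char) : Char := if c ∈ pvValidCharacters.toList then c else '.'

theorem pvRunScan_nil : pvRunScan [] = [] := by rw [pvRunScan.eq_def]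

theorem pvRunScan_cons (c : Char) (t : List Char) : pvRunScan (c :: t) =
    (if decide (c ∈ pvValidCharacters.toList)
       then c :: (pvTakeRun (decide (c ∈ pvValidCharacters.toList)) t).1
       else List.replicate (c :: (pvTakeRun (decide (c ∈ pvValidCharacters.toList)) t).1).length '.')
      ++ pvRunScan (pvTakeRun (decide (c ∈ pvValidCharacters.toList)) t).2 := by
  rw [pvRunScan.eq_def]

theorem pv_foldl_eq_map (l : List Char) (acc : List Char) :
    l.foldl (fun acc char => acc ++ [if char ∈ pvValidCharacters.toList then char else '.']) acc
      = acc ++ l.map pvF := by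
  induction l generalizing acc with
  | nil => simp
  | cons c t ih => simp [List.foldl_cons, ih, pvF]

theorem pvTakeRun_eq (ok : Bool) (l : List Char) :
    pvTakeRun ok l
      = (l.takeWhile (fun c => decide (c ∈ pvValidCharacters.toList) == ok),
         l.dropWhile (fun c => decide (c ∈ pvValidCharacters.toList) == ok)) := by
  induction l with
  | nil => simp [pvTakeRun]
  | cons c t ih =>
      simp only [pvTakeRun, List.takeWhile, List.dropWhile]
      by_cases h : decide (c ∈ pvValidCharacters.toList) = ok
      · simp [h, ih]
      · have hb : (decide (c ∈ pvValidCharacters.toList) == ok) = false := by simp [h]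
        simp [h, hb]

theorem pv_map_run_true (l : List Char)
    (h : ∀ c ∈ l, decide (c ∈ pvValidCharacters.toList) = true) :
    l.map pvF = l := by
  induction l with
  | nil => simp
  | cons c t ih =>
      have hc := h c (by simp)
      simp only [List.map_cons, pvF, if_pos (by simpa using hc)]
      rw [ih (fun x hx => h x (by simp [hx]))]

theorem pv_map_run_false (l : List Char)
    (h : ∀ c ∈ l, decide (c ∈ pvValidCharacters.toList) = false) :
    l.map pvF = List.replicate l.length '.' := by
  induction l with
  | nil => simp
  | cons c t ih =>
      have hc := h c (by simp)
      simp only [List.map_cons, pvF, List.length_cons, List.replicate_succ]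
      rw [if_neg (by simpa using hc), ih (fun x hx => h x (by simp [hx]))]

theorem pvRunScan_eq_map_aux (n : Nat) : ∀ l : List Char, l.length ≤ n → pvRunScan l = l.map pvF := by
  induction n with
  | zero =>
      intro l hl
      have : l = [] := List.eq_nil_of_length_eq_zero (Nat.le_zero.mp hl)
      subst this
      rw [pvRunScan_nil]
      simp
  | succ n ih =>
      intro l hl
      match l with
      | [] => rw [pvRunScan_nil]; simp
      | c :: t =>
          rw [pvRunScan_cons]
          set ok := decide (c ∈ pvValidCharacters.toList) with hok
          set p := pvTakeRun ok t with hp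
          have hrun := pvTakeRun_eq ok t
          rw [← hp] at hrun
          have hfst : p.1 = t.takeWhile (fun c => decide (c ∈ pvValidCharacters.toList) == ok) := by
            rw [hrun]
          have hsnd : p.2 = t.dropWhile (fun c => decide (c ∈ pvValidCharacters.toList) == ok) := by
            rw [hrun]
          have hsplit : t = p.1 ++ p.2 := by rw [hfst, hsnd]; simp
          have hlen : p.2.length ≤ n := by
            have := pvTakeRun_snd_length_le ok t
            rw [← hp] at this
            have hlt : t.length ≤ n := Nat.le_of_succ_le_succ (by simpa using hl)
            omega
          have hmem : ∀ x ∈ p.1, decide (x ∈ pvValidCharacters.toList) = ok := by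
            intro x hx
            rw [hfst] at hx
            simpa using List.mem_takeWhile_imp hx
          rw [ih p.2 hlen]
          conv_rhs => rw [hsplit]
          simp only [List.map_cons, List.map_append]
          cases hokv : ok with
          | true =>
              rw [hokv] at hmem
              rw [pv_map_run_true p.1 hmem]
              have hc : decide (c ∈ pvValidCharacters.toList) = true := by rw [← hok, hokv]
              simp [pvF, show c ∈ pvValidCharacters.toList from of_decide_eq_true hc]
          | false =>
              rw [hokv] at hmem
              rw [pv_map_run_false p.1 hmem]
              have hc : decide (c ∈ pvValidCharacters.toList) = false := by rw [← hok, hokv]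
              simp [pvF, List.replicate_succ, show c ∉ pvValidCharacters.toList from of_decide_eq_false hc]

theorem pvRunScan_eq_map (l : List Char) : pvRunScan l = l.map pvF :=
  pvRunScan_eq_map_aux l.length l (Nat.le_refl _)

-- ===== VERDICT (by name: the statement is the Claim_ definition above) =====
theorem r_style_make_names_spec : Claim_equal_r_style_make_names := by
  intro s _
  unfold Spec_r_style_make_names r_style_make_names r_style_make_names_alt
  rw [pv_foldl_eq_map, pvRunScan_eq_map]
  simp
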